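-- pv_equiv track=rewrite | github.com/RoKivals/Exam-Programming-EGE | EGE#17/ege#17(52).py | signs_8
-- ===== SOURCE A (Python) =====
-- def signs_8(i):
--     count = 0
--     while i:
--         i //= 8
--         count += 1
--     if count == 5:
--         return True
--     else:
--         return False
-- ===== SOURCE B (Python) =====
-- def signs_8(i):
--     # exactly 5 octal digits <=> 8**4 <= i < 8**5
--     return 4096 <= i < 32768
-- ===== Notes on version B (the rewrite author's own statement) =====
-- stated objective: simpler
-- what changed: Replaces the digit-counting //=8 loop with a closed-form range test 4096 <= i < 32768 (8**4 <= i < 8**5); Pre_ excludes i < 0, where A's loop never terminates.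
import Mathlib
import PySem

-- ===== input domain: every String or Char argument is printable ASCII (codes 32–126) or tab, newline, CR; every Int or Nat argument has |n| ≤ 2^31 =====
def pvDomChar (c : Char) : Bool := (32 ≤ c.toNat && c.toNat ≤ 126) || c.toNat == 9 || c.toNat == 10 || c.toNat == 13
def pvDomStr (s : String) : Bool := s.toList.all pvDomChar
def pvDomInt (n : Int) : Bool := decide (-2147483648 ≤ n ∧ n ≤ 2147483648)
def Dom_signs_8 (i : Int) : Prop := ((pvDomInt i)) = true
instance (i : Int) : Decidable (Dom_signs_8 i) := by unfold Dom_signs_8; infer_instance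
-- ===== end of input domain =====

-- B replaces A's digit-counting loop with the closed-form range test 4096 ≤ i < 32768 (simpler).
-- ===== PORT A =====
-- the 'while i:' loop: count the floor-divisions by 8 until i becomes 0.
-- On i < 0 Python loops forever (i //= 8 stalls at -1); that case is outside Pre_ below
-- and the port returns 0 there only so that the function is total in Lean.
def pvCountLoop (i : Int) : Int :=
  if i = 0 then 0
  else if i < 0 then 0   -- Python diverges here; excluded by Pre_signs_8
  else 1 + pvCountLoop (PySem.Int.floordiv i 8)
termination_by i.toNat
decreasing_by
  have h8 : PySem.Int.floordiv i 8 = i / 8 := PySem.Int.floordiv_eq_ediv_of_pos (by omega)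
  rw [h8]; omega

def signs_8 (i : Int) : Bool := if pvCountLoop i = 5 then true else false

-- ===== PORT B =====
def signs_8_alt (i : Int) : Bool := decide (4096 ≤ i ∧ i < 32768)

-- ===== PRECONDITION & SPEC =====
-- Pre_ excludes i < 0: there A's loop never terminates (i //= 8 stalls at -1), so A returns no value.
def Pre_signs_8 (i : Int) : Prop := 0 ≤ i
instance (i : Int) : Decidable (Pre_signs_8 i) := by unfold Pre_signs_8; infer_instance
def pvWitness_signs_8 : Int := 4096

def Spec_signs_8 (i : Int) (out : Bool) : Prop := out = signs_8_alt i
instance (i : Int) (out : Bool) : Decidable (Spec_signs_8 i out) := by unfold Spec_signs_8; infer_instance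

-- ===== CLAIM (what is proved, stated in full; the proofs are below) =====
def Claim_equal_signs_8 : Prop := ∀ (i : Int), Dom_signs_8 i → Pre_signs_8 i → Spec_signs_8 i (signs_8 i)

-- ===== LEMMAS AND PROOFS =====
theorem pvCountLoop_zero : pvCountLoop 0 = 0 := by rw [pvCountLoop]; simp

theorem pvCountLoop_pos (i : Int) (h : 0 < i) :
    pvCountLoop i = 1 + pvCountLoop (i / 8) := by
  rw [pvCountLoop, if_neg (by omega), if_neg (by omega),
    PySem.Int.floordiv_eq_ediv_of_pos (by omega : (0:Int) < 8)]

theorem pvCountLoop_eq_zero_iff (i : Int) (h : 0 ≤ i) : pvCountLoop i = 0 ↔ i = 0 := by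
  constructor
  · intro h0
    by_contra hne
    have hpos : 0 < i := by omega
    have hrec := pvCountLoop_pos i hpos
    have hnn : 0 ≤ pvCountLoop (i / 8) := by
      clear h0 hrec
      have hd : 0 ≤ i / 8 := by positivity
      generalize i / 8 = j at hd
      induction j using pvCountLoop.induct with
      | case1 => rw [pvCountLoop_zero]
      | case2 j h0 hneg => rw [pvCountLoop]; simp [h0, hneg]
      | case3 j h0 hneg ih =>
        have hpos : 0 < j := by omega
        rw [pvCountLoop_pos j hpos]
        have : 0 ≤ j / 8 := by positivity
        have := ih (by rwa [PySem.Int.floordiv_eq_ediv_of_pos (by omega : (0:Int) < 8)])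
        rw [PySem.Int.floordiv_eq_ediv_of_pos (by omega : (0:Int) < 8)] at this
        omega
    omega
  · intro h0; rw [h0, pvCountLoop_zero]

theorem pvCountLoop_succ_iff (c : Nat) : ∀ (i : Int), 0 ≤ i →
    (pvCountLoop i = (c : Int) + 1 ↔ (8:Int)^c ≤ i ∧ i < (8:Int)^(c+1)) := by
  induction c with
  | zero =>
    intro i h
    rcases eq_or_lt_of_le h with h0 | hpos
    · rw [← h0, pvCountLoop_zero]; norm_num
    · rw [pvCountLoop_pos i hpos]
      have hd : 0 ≤ i / 8 := by positivity
      have := pvCountLoop_eq_zero_iff (i / 8) hd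
      constructor
      · intro he
        have : i / 8 = 0 := this.mp (by omega)
        simp only [pow_zero]
        omega
      · intro ⟨h1, h2⟩
        simp only [pow_zero] at h1 h2
        have : i / 8 = 0 := by omega
        have := this ▸ pvCountLoop_zero
        omega
  | succ c ih =>
    intro i h
    rcases eq_or_lt_of_le h with h0 | hpos
    · rw [← h0, pvCountLoop_zero]
      constructor
      · intro he; exfalso; omega
      · intro ⟨h1, _⟩
        exfalso
        have : (0:Int) < 8^(c+1) := by positivity
        omega
    · rw [pvCountLoop_pos i hpos]
      have hd : 0 ≤ i / 8 := by positivity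
      have hih := ih (i / 8) hd
      have hA : (1:Int) ≤ 8^c := one_le_pow₀ (by norm_num)
      rw [pow_succ, pow_succ, pow_succ]
      constructor
      · intro he
        have := hih.mp (by omega)
        generalize hg : (8:Int)^c = A at this hA
        constructor <;> omega
      · intro ⟨h1, h2⟩
        have : pvCountLoop (i / 8) = (c : Int) + 1 := by
          apply hih.mpr
          generalize hg : (8:Int)^c = A at h1 h2 hA ⊢
          constructor <;> omega
        omega

-- ===== VERDICT (by name: the statement is the Claim_ definition above) =====
theorem signs_8_spec : Claim_equal_signs_8 := by
  intro i _ hpre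
  unfold Spec_signs_8 signs_8 signs_8_alt
  have h5 := pvCountLoop_succ_iff 4 i hpre
  norm_num at h5
  by_cases hc : pvCountLoop i = 5
  · rw [if_pos hc]
    have := h5.mp hc
    simp [this.1, this.2]
  · rw [if_neg hc]
    have : ¬ (4096 ≤ i ∧ i < 32768) := fun hr => hc (h5.mpr hr)
    simp [this]
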